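-- pv_equiv track=rewrite | github.com/samasadii/matrix-square-root | sqrtp.py | divide_lists
-- ===== SOURCE A (Python) =====
-- def divide_lists(cycles):
--     evens = []
--     odds = []
--     result = []
--
--     for cycle in cycles:
--         if ((len(cycle) % 2) == 0):
--             evens.append(cycle)
--         else:
--             odds.append(cycle)
--
--     evens.sort(key=len)
--     odds.sort(key=len)
--
--     result.append(evens)
--     result.append(odds)
--
--     return result
-- ===== SOURCE B (Python) =====
-- def divide_lists(cycles):
--     buckets = {}
--     for cycle in cycles:
--         buckets.setdefault(len(cycle), []).append(cycle)
--     evens = []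
--     odds = []
--     for length in sorted(buckets):
--         if length % 2 == 0:
--             evens += buckets[length]
--         else:
--             odds += buckets[length]
--     return [evens, odds]
-- ===== Notes on version B (the rewrite author's own statement) =====
-- stated objective: alternative
-- what changed: B groups the cycles into a dict of buckets keyed by length (one pass) and concatenates the buckets over the sorted distinct lengths split by parity, replacing A's partition pass plus two comparison sorts of the cycle lists.
import Mathlib
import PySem

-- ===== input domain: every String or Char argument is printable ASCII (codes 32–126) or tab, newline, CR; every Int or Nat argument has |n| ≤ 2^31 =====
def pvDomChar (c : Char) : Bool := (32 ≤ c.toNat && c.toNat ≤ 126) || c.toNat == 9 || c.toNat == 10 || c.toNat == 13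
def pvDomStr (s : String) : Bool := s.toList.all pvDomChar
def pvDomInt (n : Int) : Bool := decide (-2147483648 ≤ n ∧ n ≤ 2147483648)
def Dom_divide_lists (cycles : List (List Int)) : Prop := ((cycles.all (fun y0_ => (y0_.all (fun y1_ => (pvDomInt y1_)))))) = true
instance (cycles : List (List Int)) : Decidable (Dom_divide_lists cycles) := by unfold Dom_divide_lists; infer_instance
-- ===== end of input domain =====

-- B groups the cycles into a dict of buckets keyed by length and concatenates the buckets over the
-- sorted distinct lengths, instead of A's partition pass followed by two comparison sorts; objective: alternative.

-- ===== PORT A =====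
def divide_lists (cycles : List (List Int)) : List (List (List Int)) :=
  let eo := cycles.foldl (fun (eo : List (List Int) × List (List Int)) cycle =>
      if PySem.Int.mod (PySem.List.len cycle) 2 = 0 then (eo.1 ++ [cycle], eo.2)
      else (eo.1, eo.2 ++ [cycle])) ([], [])
  let evens := PySem.List.sorted eo.1 (fun c => PySem.List.len c)
  let odds := PySem.List.sorted eo.2 (fun c => PySem.List.len c)
  (([] ++ [evens]) ++ [odds])

-- ===== PORT B =====
def divide_lists_alt (cycles : List (List Int)) : List (List (List Int)) :=
  let buckets := cycles.foldl (fun (d : PySem.Dict Int (List (List Int))) cycle =>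
      d.insert (PySem.List.len cycle) (d.getD (PySem.List.len cycle) [] ++ [cycle]))
    PySem.Dict.empty
  let eo := (PySem.List.sorted (PySem.Dict.keys buckets) (fun x => x)).foldl
      (fun (eo : List (List Int) × List (List Int)) length =>
        if PySem.Int.mod length 2 = 0 then (eo.1 ++ buckets.getD length [], eo.2)
        else (eo.1, eo.2 ++ buckets.getD length [])) ([], [])
  [eo.1, eo.2]

-- ===== PRECONDITION & SPEC =====
def Spec_divide_lists (cycles : List (List Int)) (out : List (List (List Int))) : Prop := out = divide_lists_alt cycles
instance (cycles : List (List Int)) (out : List (List (List Int))) : Decidable (Spec_divide_lists cycles out) := by unfold Spec_divide_lists; infer_instance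

-- ===== CLAIM (what is proved, stated in full; the proofs are below) =====
def Claim_equal_divide_lists : Prop := ∀ (cycles : List (List Int)), Dom_divide_lists cycles → Spec_divide_lists cycles (divide_lists cycles)

-- ===== LEMMAS AND PROOFS =====

-- insertBy puts x in front when x goes before every element of ys
theorem pv_insertBy_all_before {α : Type} (bef : α → α → Bool) (x : α) (ys : List α)
    (h : ∀ z ∈ ys, bef x z = true) :
    PySem.List.insertBy bef x ys = x :: ys := by
  cases ys with
  | nil => rfl
  | cons y ys => simp [PySem.List.insertBy, h y (by simp)]

-- insertBy into a key-sorted list keeps it key-sorted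
theorem pv_insertBy_pairwise {α κ : Type} [LinearOrder κ] (key : α → κ) (x : α) (ys : List α)
    (h : ys.Pairwise (fun a b => key a ≤ key b)) :
    (PySem.List.insertBy (fun a b => decide (key a < key b)) x ys).Pairwise
      (fun a b => key a ≤ key b) := by
  induction ys with
  | nil => simp [PySem.List.insertBy]
  | cons y ys ih =>
    rcases List.pairwise_cons.mp h with ⟨hy, ht⟩
    by_cases hlt : key x < key y
    · simp only [PySem.List.insertBy, hlt, decide_true]
      refine List.pairwise_cons.mpr ⟨?_, h⟩
      intro z hz
      rw [List.mem_cons] at hz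
      rcases hz with hz | hz
      · exact le_of_lt (hz ▸ hlt)
      · exact le_of_lt (lt_of_lt_of_le hlt (hy z hz))
    · simp only [PySem.List.insertBy, hlt, decide_false, Bool.false_eq_true, if_false]
      refine List.pairwise_cons.mpr ⟨?_, ih ht⟩
      intro z hz
      rcases (PySem.List.mem_insertBy _ _ _ _).mp hz with hz | hz
      · exact hz ▸ le_of_not_gt hlt
      · exact hy z hz

-- filtering commutes with one insertBy step into a key-sorted list
theorem pv_filter_insertBy {α κ : Type} [LinearOrder κ] (key : α → κ) (p : α → Bool)
    (x : α) (ys : List α) (h : ys.Pairwise (fun a b => key a ≤ key b)) :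
    (PySem.List.insertBy (fun a b => decide (key a < key b)) x ys).filter p =
      if p x then PySem.List.insertBy (fun a b => decide (key a < key b)) x (ys.filter p)
      else ys.filter p := by
  induction ys with
  | nil => cases hp : p x <;> simp [PySem.List.insertBy, List.filter, hp]
  | cons y ys ih =>
    rcases List.pairwise_cons.mp h with ⟨hy, ht⟩
    by_cases hlt : key x < key y
    · simp only [PySem.List.insertBy, hlt, decide_true, if_true]
      cases hp : p x with
      | false => simp [List.filter, hp]
      | true =>
        have hall : ∀ z ∈ (y :: ys).filter p, (fun a b => decide (key a < key b)) x z = true := by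
          intro z hz
          have hz' := List.mem_of_mem_filter hz
          rw [List.mem_cons] at hz'
          rcases hz' with hz' | hz'
          · simpa [hz'] using hlt
          · exact decide_eq_true (lt_of_lt_of_le hlt (hy z hz'))
        rw [List.filter_cons_of_pos hp, if_pos rfl]
        exact (pv_insertBy_all_before _ _ _ hall).symm
    · simp only [PySem.List.insertBy, hlt, decide_false, Bool.false_eq_true, if_false]
      cases hp : p x <;> cases hpy : p y <;>
        simp [List.filter, hp, hpy, ih ht, PySem.List.insertBy, hlt]

-- the insertion-sort fold commutes with filtering (invariant: accumulator key-sorted)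
theorem pv_filter_foldl {α κ : Type} [LinearOrder κ] (key : α → κ) (p : α → Bool) :
    ∀ (xs acc : List α), acc.Pairwise (fun a b => key a ≤ key b) →
    (xs.foldl (fun acc x => PySem.List.insertBy (fun a b => decide (key a < key b)) x acc) acc).filter p =
      (xs.filter p).foldl (fun acc x => PySem.List.insertBy (fun a b => decide (key a < key b)) x acc)
        (acc.filter p) := by
  intro xs
  induction xs with
  | nil => intro acc _; rfl
  | cons x xs ih =>
    intro acc hacc
    have hins := pv_insertBy_pairwise key x acc hacc
    cases hp : p x with
    | true =>
      simp only [List.foldl, List.filter, hp]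
      rw [ih _ hins, pv_filter_insertBy key p x acc hacc, hp, if_pos rfl]
    | false =>
      simp only [List.foldl, List.filter, hp]
      rw [ih _ hins, pv_filter_insertBy key p x acc hacc, hp]
      simp

-- sorting then filtering equals filtering then sorting (stable sort, any Bool predicate)
theorem pv_filter_sorted {α κ : Type} [LinearOrder κ] (key : α → κ) (p : α → Bool) (xs : List α) :
    (PySem.List.sorted xs key).filter p = PySem.List.sorted (xs.filter p) key := by
  rw [PySem.List.sorted_eq_foldl_insertBy, PySem.List.sorted_eq_foldl_insertBy]
  simpa using pv_filter_foldl key p xs [] (by simp)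

-- A's partition fold is a pair of filters
theorem pv_partition_foldl (xs : List (List Int)) :
    (xs.foldl (fun (eo : List (List Int) × List (List Int)) cycle =>
        if PySem.Int.mod (PySem.List.len cycle) 2 = 0 then (eo.1 ++ [cycle], eo.2)
        else (eo.1, eo.2 ++ [cycle])) ([], [])) =
      (xs.filter (fun c => decide (PySem.Int.mod (PySem.List.len c) 2 = 0)),
       xs.filter (fun c => ! decide (PySem.Int.mod (PySem.List.len c) 2 = 0))) := by
  have hfun : (fun (eo : List (List Int) × List (List Int)) cycle =>
        if PySem.Int.mod (PySem.List.len cycle) 2 = 0 then (eo.1 ++ [cycle], eo.2)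
        else (eo.1, eo.2 ++ [cycle])) =
      (fun (eo : List (List Int) × List (List Int)) cycle =>
        (if decide (PySem.Int.mod (PySem.List.len cycle) 2 = 0) then eo.1 ++ [cycle] else eo.1,
         if ! decide (PySem.Int.mod (PySem.List.len cycle) 2 = 0) then eo.2 ++ [cycle] else eo.2)) := by
    funext eo cycle
    by_cases h : PySem.Int.mod (PySem.List.len cycle) 2 = 0
    · rw [if_pos h, if_pos (by simp only [decide_eq_true_eq]; exact h),
          if_neg (by simp only [Bool.not_eq_true', decide_eq_false_iff_not]; exact not_not_intro h)]
    · rw [if_neg h, if_neg (by simp only [decide_eq_true_eq]; exact h),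
          if_pos (by simp only [Bool.not_eq_true', decide_eq_false_iff_not]; exact h)]
  rw [hfun, PySem.List.foldl_prod_mk
        (f := fun (acc : List (List Int)) c =>
          if decide (PySem.Int.mod (PySem.List.len c) 2 = 0) then acc ++ [c] else acc)
        (g := fun (acc : List (List Int)) c =>
          if ! decide (PySem.Int.mod (PySem.List.len c) 2 = 0) then acc ++ [c] else acc)]
  rw [PySem.List.foldl_append_if_eq_filter, PySem.List.foldl_append_if_eq_filter]
  simp

-- each bucket of B's grouping dict is a filter of the input
theorem pv_buckets_getD (xs : List (List Int)) (d : PySem.Dict Int (List (List Int))) (L : Int) :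
    (xs.foldl (fun (d : PySem.Dict Int (List (List Int))) c =>
        d.insert (PySem.List.len c) (d.getD (PySem.List.len c) [] ++ [c])) d).getD L [] =
      d.getD L [] ++ xs.filter (fun c => decide (PySem.List.len c = L)) := by
  induction xs generalizing d with
  | nil => simp
  | cons c xs ih =>
    simp only [List.foldl, List.filter]
    rw [ih]
    by_cases h : PySem.List.len c = L
    · subst h
      simp [PySem.List.len]
    · simp only [PySem.List.len] at h
      simp [PySem.Dict.getD_insert, PySem.List.len, h, Ne.symm h]

-- the keys of B's grouping dict are the distinct lengths in first-occurrence order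
theorem pv_buckets_keys (xs : List (List Int)) :
    (xs.foldl (fun (d : PySem.Dict Int (List (List Int))) c =>
        d.insert (PySem.List.len c) (d.getD (PySem.List.len c) [] ++ [c])) PySem.Dict.empty).keys =
      PySem.Set.ofList (xs.map (fun c => PySem.List.len c)) := by
  rw [PySem.Dict.keys_foldl_insert_key (key := fun c => PySem.List.len c)]
  simp [PySem.Set.update, PySem.Set.ofList_eq_foldl, PySem.Dict.keys_empty]

-- in a key-sorted list whose keys all dominate m, the key-m elements form a prefix
theorem pv_min_prefix {α : Type} (key : α → Int) (m : Int) :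
    ∀ (l : List α), l.Pairwise (fun a b => key a ≤ key b) → (∀ c ∈ l, m ≤ key c) →
    l = l.filter (fun c => decide (key c = m)) ++ l.filter (fun c => ! decide (key c = m)) := by
  intro l
  induction l with
  | nil => intro _ _; rfl
  | cons x l ih =>
    intro hp hm
    rcases List.pairwise_cons.mp hp with ⟨hx, ht⟩
    by_cases hxm : key x = m
    · rw [List.filter_cons_of_pos (by simp [hxm]), List.filter_cons_of_neg (by simp [hxm])]
      simp only [List.cons_append, List.cons.injEq, true_and]
      exact ih ht (fun c hc => hm c (List.mem_cons_of_mem _ hc))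
    · have hnone : ∀ c ∈ x :: l, key c ≠ m := by
        intro c hc
        rw [List.mem_cons] at hc
        rcases hc with hc | hc
        · exact hc ▸ hxm
        · have := hx c hc
          have hmx := hm x (List.mem_cons_self)
          intro hcm
          exact hxm (le_antisymm (by omega) hmx)
      rw [List.filter_eq_nil_iff.mpr (by intro c hc; simpa using hnone c hc)]
      rw [List.filter_eq_self.mpr (by intro c hc; simpa using hnone c hc)]
      simp

-- flatMap congruence over members
theorem pv_flatMap_congr {α β : Type} {ks : List α} {f g : α → List β}
    (h : ∀ k ∈ ks, f k = g k) : ks.flatMap f = ks.flatMap g := by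
  induction ks with
  | nil => rfl
  | cons k ks ih =>
    rw [List.flatMap_cons, List.flatMap_cons, h k List.mem_cons_self,
      ih (fun k hk => h k (List.mem_cons_of_mem _ hk))]

-- stable sort = concatenation of the original-order buckets over the sorted distinct keys
theorem pv_sorted_flatMap {α : Type} (key : α → Int) :
    ∀ (ks : List Int) (ys : List α), ks.Pairwise (· < ·) → (∀ c ∈ ys, key c ∈ ks) →
    PySem.List.sorted ys key =
      ks.flatMap (fun k => ys.filter (fun c => decide (key c = k))) := by
  intro ks
  induction ks with
  | nil =>
    intro ys _ hmem
    cases ys with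
    | nil => rfl
    | cons y ys => exact absurd (hmem y List.mem_cons_self) (by simp)
  | cons k ks ih =>
    intro ys hp hmem
    rcases List.pairwise_cons.mp hp with ⟨hk, ht⟩
    have hsp : (PySem.List.sorted ys key).Pairwise (fun a b => key a ≤ key b) :=
      PySem.List.sorted_pairwise ys key
    have hmin : ∀ c ∈ PySem.List.sorted ys key, k ≤ key c := by
      intro c hc
      have hc' : c ∈ ys := (PySem.List.mem_sorted _ _ _ _).mp hc
      have := hmem c hc'
      rw [List.mem_cons] at this
      rcases this with h | h
      · omega
      · exact le_of_lt (hk _ h)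
    have hall : ∀ c ∈ ys.filter (fun c => decide (key c = k)), ∀ b ∈ ys.filter (fun c => decide (key c = k)), key c ≤ key b := by
      intro c hc b hb
      have hc' := of_decide_eq_true ((List.mem_filter.mp hc).2)
      have hb' := of_decide_eq_true ((List.mem_filter.mp hb).2)
      rw [hc', hb']
    calc PySem.List.sorted ys key
        = (PySem.List.sorted ys key).filter (fun c => decide (key c = k)) ++
            (PySem.List.sorted ys key).filter (fun c => ! decide (key c = k)) :=
          pv_min_prefix key k _ hsp hmin
      _ = ys.filter (fun c => decide (key c = k)) ++
            PySem.List.sorted (ys.filter (fun c => ! decide (key c = k))) key := by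
          rw [pv_filter_sorted, pv_filter_sorted,
            PySem.List.sorted_eq_self_of_pairwise _ _ (List.pairwise_of_forall_mem_list hall)]
      _ = ys.filter (fun c => decide (key c = k)) ++
            ks.flatMap (fun k' => (ys.filter (fun c => ! decide (key c = k))).filter
              (fun c => decide (key c = k'))) := by
          rw [ih _ ht]
          intro c hc
          have hc' : c ∈ ys := List.mem_of_mem_filter hc
          have hne : ¬ (key c = k) := by simpa using List.of_mem_filter hc
          have := hmem c hc'
          rw [List.mem_cons] at this
          tauto
      _ = ys.filter (fun c => decide (key c = k)) ++
            ks.flatMap (fun k' => ys.filter (fun c => decide (key c = k'))) := by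
          congr 1
          apply pv_flatMap_congr
          intro k' hk'
          have hkk' : k ≠ k' := ne_of_lt (hk k' hk')
          rw [List.filter_filter]
          apply List.filter_congr
          intro c _
          by_cases h : key c = k'
          · simp [h, Ne.symm hkk']
          · simp [h]
      _ = (k :: ks).flatMap (fun k' => ys.filter (fun c => decide (key c = k'))) := by
          rw [List.flatMap_cons]

-- one parity side: A's sort-of-filter = B's concatenation of buckets over the matching sorted keys
theorem pv_side (cycles : List (List Int)) (P : Int → Bool) :
    PySem.List.sorted (cycles.filter (fun c => P (PySem.List.len c))) (fun c => PySem.List.len c) =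
      ((PySem.List.sorted (PySem.Set.ofList (cycles.map (fun c => PySem.List.len c))) (fun x => x)).filter P).flatMap
        (fun k => cycles.filter (fun c => decide (PySem.List.len c = k))) := by
  have hpw : ((PySem.List.sorted (PySem.Set.ofList (cycles.map (fun c => PySem.List.len c)))
      (fun x => x)).filter P).Pairwise (· < ·) :=
    (PySem.List.sorted_ofList_pairwise_lt _).filter P
  have hmem : ∀ c ∈ cycles.filter (fun c => P (PySem.List.len c)),
      PySem.List.len c ∈ (PySem.List.sorted (PySem.Set.ofList (cycles.map (fun c => PySem.List.len c)))
        (fun x => x)).filter P := by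
    intro c hc
    have hc' : c ∈ cycles := List.mem_of_mem_filter hc
    have hP : P (PySem.List.len c) = true := (List.mem_filter.mp hc).2
    apply List.mem_filter.mpr
    refine ⟨?_, hP⟩
    rw [PySem.List.mem_sorted, PySem.Set.mem_ofList]
    exact List.mem_map.mpr ⟨c, hc', rfl⟩
  rw [pv_sorted_flatMap (fun c => PySem.List.len c) _ _ hpw hmem]
  apply pv_flatMap_congr
  intro k hk
  have hPk : P k = true := List.of_mem_filter hk
  rw [List.filter_filter]
  apply List.filter_congr
  intro c _
  by_cases h : PySem.List.len c = k
  · simp only [PySem.List.len] at h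
    simp [h, hPk]
  · simp only [PySem.List.len] at h
    simp [h]

-- B's output fold over the sorted keys is a pair of bucket concatenations split by parity
theorem pv_pair_fold (f : Int → List (List Int)) :
    ∀ (ks : List Int) (a b : List (List Int)),
    ks.foldl (fun (eo : List (List Int) × List (List Int)) L =>
        if PySem.Int.mod L 2 = 0 then (eo.1 ++ f L, eo.2) else (eo.1, eo.2 ++ f L)) (a, b) =
      (a ++ (ks.filter (fun L => decide (PySem.Int.mod L 2 = 0))).flatMap f,
       b ++ (ks.filter (fun L => ! decide (PySem.Int.mod L 2 = 0))).flatMap f) := by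
  intro ks
  induction ks with
  | nil => intro a b; simp
  | cons L ks ih =>
    intro a b
    by_cases h : PySem.Int.mod L 2 = 0
    · simp only [List.foldl, h, if_pos, List.filter]
      rw [ih]
      simp
    · simp only [List.foldl, h, List.filter]
      rw [ih]
      simp

-- ===== VERDICT (by name: the statement is the Claim_ definition above) =====
theorem divide_lists_spec : Claim_equal_divide_lists := by
  intro cycles _
  unfold Spec_divide_lists divide_lists divide_lists_alt
  simp only [pv_partition_foldl, pv_buckets_keys, pv_pair_fold]
  have hbuck : ∀ L : Int,
      (cycles.foldl (fun (d : PySem.Dict Int (List (List Int))) c =>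
        d.insert (PySem.List.len c) (d.getD (PySem.List.len c) [] ++ [c])) PySem.Dict.empty).getD L []
      = cycles.filter (fun c => decide (PySem.List.len c = L)) := by
    intro L
    rw [pv_buckets_getD]
    simp
  simp only [hbuck]
  rw [← pv_side cycles (fun L => decide (PySem.Int.mod L 2 = 0)),
      ← pv_side cycles (fun L => ! decide (PySem.Int.mod L 2 = 0))]
  simp
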